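-- pv_equiv track=rewrite | github.com/drhannahsc-arch/MABE | core/donor_enumerator.py | _estimate_chelate_rings
-- ===== SOURCE A (Python) =====
-- CHELATE_PAIRS = {
--     ("N_amine", "N_amine"),             # Ethylenediamine
--     ("N_amine", "O_carboxylate"),       # Glycinate
--     ("N_amine", "S_thiolate"),          # Cysteine
--     ("N_imine", "O_phenolate"),         # Salen
--     ("N_imine", "N_imine"),             # Bipyridine backbone
--     ("N_pyridine", "N_pyridine"),       # Bipyridine
--     ("O_catecholate", "O_catecholate"), # Catecholate bidentate
--     ("O_hydroxamate", "O_hydroxamate"), # Hydroxamate bidentate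
--     ("O_carboxylate", "O_hydroxyl"),    # Citrate-type
--     ("O_carboxylate", "O_carboxylate"), # Malonate-type (6-ring but counts)
--     ("S_dithiocarbamate", "S_dithiocarbamate"),  # DTC bidentate
--     ("N_amine", "N_pyridine"),          # Picolylamine
--     ("N_amine", "N_imidazole"),         # Histamine-type
--     ("N_amine", "O_hydroxamate"),       # DFOB-type
--     ("N_pyridine", "O_carboxylate"),    # Picolinate
--     ("N_imidazole", "O_carboxylate"),   # Histidine
--     ("S_thioether", "N_amine"),         # Met-type
--     ("O_ether", "O_ether"),             # Crown ether
--     ("P_phosphine", "P_phosphine"),     # Bisphosphine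
--     # ── Non-carbon-bias chelate pairs ────────────────────────────────────
--     # Se-containing chelate pairs
--     ("Se_selenolate", "N_amine"),        # Selenocysteine-type 5-ring
--     ("Se_selenolate", "N_imine"),        # Se/N Schiff-base chelate
--     ("Se_selenolate", "Se_selenolate"),  # Diselenolate bidentate
--     ("Se_selenoether", "Se_selenoether"),# Selenacrown ether
--     ("S_thiolate", "Se_selenolate"),     # Mixed S/Se bidentate
--     ("Se_selenolate", "O_carboxylate"),  # Se-carboxylate 5-ring
--     # P-containing chelate pairs
--     ("P_phosphine", "N_amine"),          # Aminophosphine 5-ring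
--     ("P_phosphine", "S_thiolate"),       # Phosphino-thiolate
--     ("P_phosphine", "Se_selenolate"),    # Phosphino-selenolate
--     ("P_phosphine", "O_carboxylate"),    # Phosphinocarboxylate
--     ("P_phosphite", "P_phosphite"),      # Bisphosphite
--     ("As_arsine", "As_arsine"),          # Bis(arsine)
--     ("As_arsine", "P_phosphine"),        # As/P mixed bidentate
--     ("As_arsine", "N_amine"),            # Arsino-amine
--     # C-donor pairs
--     ("C_cyanide", "N_amine"),            # Cyanide + amine (ambidentate)
--     # Oxime chelate pairs
--     ("N_oxime", "N_oxime"),              # Bis-oxime (DMG-type)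
--     ("N_oxime", "N_amine"),              # Oxime-amine
--     # Te (rare; only for extreme soft metals)
--     ("Te_tellurolate", "Te_tellurolate"),
--     ("Te_tellurolate", "N_amine"),
-- }
--
-- def _estimate_chelate_rings(donor_subtypes: list[str]) -> int:
--     """Estimate maximum chelate rings from donor subtype combination."""
--     n = len(donor_subtypes)
--     if n < 2:
--         return 0
--
--     # Count how many adjacent pairs can form chelate rings
--     rings = 0
--     used = [False] * n
--     for i in range(n):
--         if used[i]:
--             continue
--         for j in range(i + 1, n):
--             if used[j]:
--                 continue
--             pair = (donor_subtypes[i], donor_subtypes[j])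
--             pair_rev = (donor_subtypes[j], donor_subtypes[i])
--             if pair in CHELATE_PAIRS or pair_rev in CHELATE_PAIRS:
--                 rings += 1
--                 used[i] = True
--                 used[j] = True
--                 break
--
--     return rings
-- ===== SOURCE B (Python) =====
-- CHELATE_PAIRS = {
--     ("N_amine", "N_amine"),
--     ("N_amine", "O_carboxylate"),
--     ("N_amine", "S_thiolate"),
--     ("N_imine", "O_phenolate"),
--     ("N_imine", "N_imine"),
--     ("N_pyridine", "N_pyridine"),
--     ("O_catecholate", "O_catecholate"),
--     ("O_hydroxamate", "O_hydroxamate"),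
--     ("O_carboxylate", "O_hydroxyl"),
--     ("O_carboxylate", "O_carboxylate"),
--     ("S_dithiocarbamate", "S_dithiocarbamate"),
--     ("N_amine", "N_pyridine"),
--     ("N_amine", "N_imidazole"),
--     ("N_amine", "O_hydroxamate"),
--     ("N_pyridine", "O_carboxylate"),
--     ("N_imidazole", "O_carboxylate"),
--     ("S_thioether", "N_amine"),
--     ("O_ether", "O_ether"),
--     ("P_phosphine", "P_phosphine"),
--     ("Se_selenolate", "N_amine"),
--     ("Se_selenolate", "N_imine"),
--     ("Se_selenolate", "Se_selenolate"),
--     ("Se_selenoether", "Se_selenoether"),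
--     ("S_thiolate", "Se_selenolate"),
--     ("Se_selenolate", "O_carboxylate"),
--     ("P_phosphine", "N_amine"),
--     ("P_phosphine", "S_thiolate"),
--     ("P_phosphine", "Se_selenolate"),
--     ("P_phosphine", "O_carboxylate"),
--     ("P_phosphite", "P_phosphite"),
--     ("As_arsine", "As_arsine"),
--     ("As_arsine", "P_phosphine"),
--     ("As_arsine", "N_amine"),
--     ("C_cyanide", "N_amine"),
--     ("N_oxime", "N_oxime"),
--     ("N_oxime", "N_amine"),
--     ("Te_tellurolate", "Te_tellurolate"),
--     ("Te_tellurolate", "N_amine"),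
-- }
--
--
-- def _compatible(a, b):
--     return (a, b) in CHELATE_PAIRS or (b, a) in CHELATE_PAIRS
--
--
-- def _estimate_chelate_rings(donor_subtypes: list) -> int:
--     """Consume the donor list left to right: pop the head, delete its first
--     compatible partner from the remainder, count the pair."""
--     items = list(donor_subtypes)
--     rings = 0
--     while items:
--         head = items.pop(0)
--         for k in range(len(items)):
--             if _compatible(head, items[k]):
--                 del items[k]
--                 rings += 1
--                 break
--     return rings
-- ===== Notes on version B (the rewrite author's own statement) =====
-- stated objective: simpler
-- what changed: B replaces A's index-based nested scans over a used-flag array with a left-to-right consumption of a working list: pop the head, delete its first compatible partner from the remainder, count the pair; no indices and no used array.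
import Mathlib
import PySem

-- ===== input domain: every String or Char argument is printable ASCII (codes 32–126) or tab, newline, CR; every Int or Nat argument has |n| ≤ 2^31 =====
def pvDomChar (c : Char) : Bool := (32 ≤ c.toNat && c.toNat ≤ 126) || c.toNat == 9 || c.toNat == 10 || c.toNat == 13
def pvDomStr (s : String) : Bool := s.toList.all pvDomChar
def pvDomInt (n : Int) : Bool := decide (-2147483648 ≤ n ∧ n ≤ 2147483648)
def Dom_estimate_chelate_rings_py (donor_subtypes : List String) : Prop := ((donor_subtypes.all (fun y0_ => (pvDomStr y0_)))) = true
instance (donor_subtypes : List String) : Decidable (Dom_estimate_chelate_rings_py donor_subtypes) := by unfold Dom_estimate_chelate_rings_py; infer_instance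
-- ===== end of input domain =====

-- B consumes the list left to right (pop head, delete its first compatible partner)
-- instead of A's index-based nested scans over a used-flag array; objective: simpler, same result.

-- shared module constant CHELATE_PAIRS (membership test only, so a plain list)
def chelatePairs : List (String × String) := [
  ("N_amine", "N_amine"), ("N_amine", "O_carboxylate"), ("N_amine", "S_thiolate"),
  ("N_imine", "O_phenolate"), ("N_imine", "N_imine"), ("N_pyridine", "N_pyridine"),
  ("O_catecholate", "O_catecholate"), ("O_hydroxamate", "O_hydroxamate"),
  ("O_carboxylate", "O_hydroxyl"), ("O_carboxylate", "O_carboxylate"),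
  ("S_dithiocarbamate", "S_dithiocarbamate"), ("N_amine", "N_pyridine"),
  ("N_amine", "N_imidazole"), ("N_amine", "O_hydroxamate"), ("N_pyridine", "O_carboxylate"),
  ("N_imidazole", "O_carboxylate"), ("S_thioether", "N_amine"), ("O_ether", "O_ether"),
  ("P_phosphine", "P_phosphine"), ("Se_selenolate", "N_amine"), ("Se_selenolate", "N_imine"),
  ("Se_selenolate", "Se_selenolate"), ("Se_selenoether", "Se_selenoether"),
  ("S_thiolate", "Se_selenolate"), ("Se_selenolate", "O_carboxylate"),
  ("P_phosphine", "N_amine"), ("P_phosphine", "S_thiolate"), ("P_phosphine", "Se_selenolate"),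
  ("P_phosphine", "O_carboxylate"), ("P_phosphite", "P_phosphite"),
  ("As_arsine", "As_arsine"), ("As_arsine", "P_phosphine"), ("As_arsine", "N_amine"),
  ("C_cyanide", "N_amine"), ("N_oxime", "N_oxime"), ("N_oxime", "N_amine"),
  ("Te_tellurolate", "Te_tellurolate"), ("Te_tellurolate", "N_amine")]

-- '(a, b) in CHELATE_PAIRS or (b, a) in CHELATE_PAIRS' (B's helper _compatible; A writes it inline)
def pairOK (a b : String) : Bool := chelatePairs.contains (a, b) || chelatePairs.contains (b, a)

-- ===== PORT A =====
-- inner 'for j in range(i+1, n): if used[j]: continue; … break' — first j: ¬used[j] ∧ compatible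
def aFind (ds : List String) (si : String) (used : List Bool) : List Nat → Option Nat
  | [] => none
  | j :: js =>
    if used.getD j false then aFind ds si used js
    else if pairOK si (ds.getD j "") then some j
    else aFind ds si used js

-- outer 'for i in range(n)' with state (used, rings)
def aOuter (ds : List String) (n : Nat) : List Nat → List Bool → Int → Int
  | [], _, rings => rings
  | i :: is, used, rings =>
    if used.getD i false then aOuter ds n is used rings
    else
      match aFind ds (ds.getD i "") used (List.range' (i + 1) (n - (i + 1))) with
      | none => aOuter ds n is used rings
      | some j => aOuter ds n is ((used.set i true).set j true) (rings + 1)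

def estimate_chelate_rings_py (donor_subtypes : List String) : Int :=
  let n := donor_subtypes.length
  if n < 2 then 0
  else aOuter donor_subtypes n (List.range n) (List.replicate n false) 0

-- ===== PORT B =====
-- 'for k in range(len(items)): if compatible: del items[k]; break' — remainder after deleting first partner
def bRemove (head : String) : List String → Option (List String)
  | [] => none
  | t :: ts =>
    if pairOK head t then some ts
    else match bRemove head ts with
         | none => none
         | some r => some (t :: r)

theorem bRemove_length {head : String} :
    ∀ {l r : List String}, bRemove head l = some r → r.length < l.length := by
  intro l
  induction l with
  | nil => intro r hr; simp [bRemove] at hr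
  | cons t ts ih =>
    intro r hr
    by_cases h : pairOK head t = true
    · simp [bRemove, h] at hr; simp [← hr]
    · simp [bRemove, h] at hr
      cases hrem : bRemove head ts with
      | none => rw [hrem] at hr; simp at hr
      | some r' =>
        rw [hrem] at hr; simp at hr
        have := ih hrem
        simp [← hr]; omega

-- 'while items: head = items.pop(0); …'
def bLoop : List String → Int → Int
  | [], rings => rings
  | head :: items, rings =>
    match h : bRemove head items with
    | none => bLoop items rings
    | some items' => bLoop items' (rings + 1)
  termination_by l _ => l.length
  decreasing_by
  · simp
  · have := bRemove_length h; simp; omega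

def estimate_chelate_rings_py_alt (donor_subtypes : List String) : Int :=
  bLoop donor_subtypes 0

-- ===== PRECONDITION & SPEC =====
def Spec_estimate_chelate_rings_py (donor_subtypes : List String) (out : Int) : Prop := out = estimate_chelate_rings_py_alt donor_subtypes
instance (donor_subtypes : List String) (out : Int) : Decidable (Spec_estimate_chelate_rings_py donor_subtypes out) := by unfold Spec_estimate_chelate_rings_py; infer_instance

-- ===== CLAIM (what is proved, stated in full; the proofs are below) =====
def Claim_equal_estimate_chelate_rings_py : Prop := ∀ (donor_subtypes : List String), Dom_estimate_chelate_rings_py donor_subtypes → Spec_estimate_chelate_rings_py donor_subtypes (estimate_chelate_rings_py donor_subtypes)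

-- ===== LEMMAS AND PROOFS =====

-- the unused elements of ds at indices [m, m+fuel), in order: what B still holds when A is at index m
def remA (ds : List String) (used : List Bool) (m fuel : Nat) : List String :=
  (List.range' m fuel).filterMap
    (fun k => if used.getD k false then none else some (ds.getD k ""))

theorem getD_set_self {l : List Bool} {m : Nat} {a d : Bool} (h : m < l.length) :
    (l.set m a).getD m d = a := by
  simp [List.getD_eq_getElem?_getD, h]

theorem getD_set_ne {l : List Bool} {j k : Nat} {a d : Bool} (h : j ≠ k) :
    (l.set j a).getD k d = l.getD k d := by
  simp [List.getD_eq_getElem?_getD, List.getElem?_set_ne h]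

theorem remA_congr {ds : List String} {u1 u2 : List Bool} {m fuel : Nat}
    (h : ∀ k ∈ List.range' m fuel, u1.getD k false = u2.getD k false) :
    remA ds u1 m fuel = remA ds u2 m fuel := by
  unfold remA
  exact List.filterMap_congr (fun k hk => by rw [h k hk])

theorem remA_cons (ds : List String) (used : List Bool) (m f : Nat) :
    remA ds used m (f + 1)
      = if used.getD m false then remA ds used (m + 1) f
        else ds.getD m "" :: remA ds used (m + 1) f := by
  unfold remA
  rw [List.range'_succ, List.filterMap_cons]
  simp only [List.getD_eq_getElem?_getD]
  cases h : used[m]?.getD false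
  · simp [h]
  · simp [h]

theorem bLoop_cons_none {head : String} {items : List String} (rings : Int)
    (h : bRemove head items = none) :
    bLoop (head :: items) rings = bLoop items rings := by
  rw [bLoop]; split <;> simp_all

theorem bLoop_cons_some {head : String} {items items' : List String} (rings : Int)
    (h : bRemove head items = some items') :
    bLoop (head :: items) rings = bLoop items' (rings + 1) := by
  rw [bLoop]; split <;> simp_all

-- the crux: A's inner scan over indices corresponds to B's first-partner deletion on the remainder
theorem find_rem (ds : List String) (s : String) :
    ∀ (fuel m : Nat) (used : List Bool), m + fuel ≤ used.length →
    (match aFind ds s used (List.range' m fuel) with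
     | none => bRemove s (remA ds used m fuel) = none
     | some j => m ≤ j ∧ j < used.length ∧
         bRemove s (remA ds used m fuel) = some (remA ds (used.set j true) m fuel)) := by
  intro fuel
  induction fuel with
  | zero => intro m used _; simp [aFind, remA, bRemove]
  | succ f ih =>
    intro m used hlen
    rw [List.range'_succ]
    by_cases hu : used.getD m false = true
    · -- used[m]: A skips m, remA drops it
      have hrem : remA ds used m (f + 1) = remA ds used (m + 1) f := by
        rw [remA_cons, if_pos hu]
      have := ih (m + 1) used (by omega)
      simp only [aFind, hu, if_pos]
      cases hfind : aFind ds s used (List.range' (m + 1) f) with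
      | none => rw [hfind] at this; rw [hrem]; exact this
      | some j =>
        rw [hfind] at this
        obtain ⟨h1, h2, h3⟩ := this
        refine ⟨by omega, h2, ?_⟩
        rw [hrem, h3]
        have hm : (used.set j true).getD m false = true := by
          rw [getD_set_ne (by omega)]; exact hu
        rw [remA_cons, if_pos hm]
    · -- not used[m]: head of the remainder is ds[m]
      have hu' : used.getD m false = false := by revert hu; cases used.getD m false <;> simp
      have hrem : remA ds used m (f + 1) = ds.getD m "" :: remA ds used (m + 1) f := by
        rw [remA_cons, hu']; simp
      by_cases hp : pairOK s (ds.getD m "") = true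
      · -- match at m itself
        simp only [aFind, hu', hp, Bool.false_eq_true, if_false, if_pos]
        refine ⟨le_refl m, by omega, ?_⟩
        rw [hrem]
        simp only [bRemove, hp, if_pos]
        congr 1
        rw [remA_cons, if_pos (getD_set_self (show m < used.length by omega))]
        exact remA_congr (fun k hk => by
          rw [getD_set_ne]
          have := List.mem_range'_1.mp hk
          omega)
      · -- no match at m: recurse; B keeps ds[m] in front
        simp only [aFind, hu', hp, Bool.false_eq_true, if_false]
        have := ih (m + 1) used (by omega)
        cases hfind : aFind ds s used (List.range' (m + 1) f) with
        | none =>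
          rw [hfind] at this
          rw [hrem]
          simp only [bRemove, if_neg hp]
          rw [this]
        | some j =>
          rw [hfind] at this
          obtain ⟨h1, h2, h3⟩ := this
          refine ⟨by omega, h2, ?_⟩
          rw [hrem]
          simp only [bRemove, hp, Bool.false_eq_true, if_false, h3]
          have hm : (used.set j true).getD m false = false := by
            rw [getD_set_ne (by omega)]; exact hu'
          rw [remA_cons, hm]; simp

-- A's outer loop from index m equals B's loop on the unused remainder
theorem outer_eq (ds : List String) :
    ∀ (fuel m : Nat) (used : List Bool) (rings : Int),
      used.length = ds.length → m + fuel = ds.length →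
      aOuter ds (ds.length) (List.range' m fuel) used rings
        = bLoop (remA ds used m fuel) rings := by
  intro fuel
  induction fuel with
  | zero => intro m used rings _ _; simp [aOuter, remA, bLoop]
  | succ f ih =>
    intro m used rings hlen hmf
    rw [List.range'_succ]
    by_cases hu : used.getD m false = true
    · have hrem : remA ds used m (f + 1) = remA ds used (m + 1) f := by
        rw [remA_cons, if_pos hu]
      simp only [aOuter, hu, if_pos]
      rw [hrem]; exact ih (m + 1) used rings hlen (by omega)
    · have hu' : used.getD m false = false := by revert hu; cases used.getD m false <;> simp
      have hrem : remA ds used m (f + 1) = ds.getD m "" :: remA ds used (m + 1) f := by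
        rw [remA_cons, hu']; simp
      have hfr := find_rem ds (ds.getD m "") f (m + 1) used (by omega)
      have hrange : ds.length - (m + 1) = f := by omega
      simp only [aOuter, hu', Bool.false_eq_true, if_false, hrange]
      cases hfind : aFind ds (ds.getD m "") used (List.range' (m + 1) f) with
      | none =>
        rw [hfind] at hfr
        rw [hrem, bLoop_cons_none rings hfr]
        exact ih (m + 1) used rings hlen (by omega)
      | some j =>
        rw [hfind] at hfr
        obtain ⟨h1, h2, h3⟩ := hfr
        rw [hrem, bLoop_cons_some rings h3]
        have hset : remA ds ((used.set m true).set j true) (m + 1) f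
            = remA ds (used.set j true) (m + 1) f :=
          remA_congr (fun k hk => by
            by_cases hkj : j = k
            · subst hkj
              rw [getD_set_self (by simpa using h2), getD_set_self h2]
            · rw [getD_set_ne hkj, getD_set_ne (by
                have := List.mem_range'_1.mp hk; omega), getD_set_ne hkj])
        rw [← hset]
        exact ih (m + 1) ((used.set m true).set j true) (rings + 1) (by simp [hlen]) (by omega)

theorem map_getD_range (l : List String) :
    (List.range l.length).map (fun k => l.getD k "") = l := by
  apply List.ext_getElem
  · simp
  · intro i h1 h2
    simp [List.getD_eq_getElem?_getD, List.getElem?_eq_getElem h2]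

theorem remA_init (ds : List String) :
    remA ds (List.replicate ds.length false) 0 ds.length = ds := by
  unfold remA
  have h : ∀ k, (List.replicate ds.length false).getD k false = false := by
    intro k
    rcases lt_or_ge k ds.length with h | h
    · simp [List.getD_eq_getElem?_getD, h]
    · simp [List.getD_eq_getElem?_getD]
  calc (List.range' 0 ds.length).filterMap
        (fun k => if (List.replicate ds.length false).getD k false then none else some (ds.getD k ""))
      = (List.range' 0 ds.length).filterMap (fun k => some (ds.getD k "")) := by
        exact List.filterMap_congr (fun k _ => by rw [h k]; simp)
    _ = (List.range' 0 ds.length).map (fun k => ds.getD k "") := by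
        rw [show (fun k => some (ds.getD k "")) = some ∘ (fun k => ds.getD k "") from rfl,
          List.filterMap_eq_map]
    _ = ds := by rw [← List.range_eq_range']; exact map_getD_range ds

-- ===== VERDICT (by name: the statement is the Claim_ definition above) =====
theorem estimate_chelate_rings_py_spec : Claim_equal_estimate_chelate_rings_py := by
  intro ds _
  unfold Spec_estimate_chelate_rings_py estimate_chelate_rings_py estimate_chelate_rings_py_alt
  by_cases h : ds.length < 2
  · simp only [h, if_pos]
    match ds, h with
    | [], _ => simp [bLoop]
    | [x], _ => simp [bLoop, bRemove]
  · simp only [h, if_false]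
    rw [List.range_eq_range']
    rw [outer_eq ds ds.length 0 (List.replicate ds.length false) 0 (by simp) (by omega)]
    rw [remA_init]
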